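-- pv_equiv track=rewrite | github.com/RajendraMargale22/JURY-AI | contract-review-backend/routes/contract_review.py | _merge_risk_levels
-- ===== SOURCE A (Python) =====
-- def _merge_risk_levels(ml_level: str, indian_risks: list[str], ml_source: str) -> str:
--     if any("high risk" in note.lower() for note in indian_risks):
--         return "high"
--     if any("medium risk" in note.lower() for note in indian_risks):
--         return "medium" if ml_level == "low" else ml_level
--     if ml_level == "medium":
--         return "low"
--     return ml_level
-- ===== SOURCE B (Python) =====
-- def _merge_risk_levels(ml_level: str, indian_risks: list[str], ml_source: str) -> str:
--     # Pass 1: summarize indian_risks into one categorical level.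
--     indian_level = "none"
--     for note in indian_risks:
--         text = note.lower()
--         if "high risk" in text:
--             indian_level = "high"
--             break
--         if "medium risk" in text:
--             indian_level = "medium"
--     # Pass 2: merge the summary with the ML level.
--     if indian_level == "high":
--         return "high"
--     if indian_level == "medium":
--         return "medium" if ml_level == "low" else ml_level
--     return "low" if ml_level == "medium" else ml_level
-- ===== Notes on version B (the rewrite author's own statement) =====
-- stated objective: alternative
-- what changed: B makes a single pass over indian_risks (breaking on the first 'high risk' note) to compute a categorical summary level, then merges that summary with ml_level in a separate decision step, instead of A's two independent any() scans inlined into the return logic.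
import Mathlib
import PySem

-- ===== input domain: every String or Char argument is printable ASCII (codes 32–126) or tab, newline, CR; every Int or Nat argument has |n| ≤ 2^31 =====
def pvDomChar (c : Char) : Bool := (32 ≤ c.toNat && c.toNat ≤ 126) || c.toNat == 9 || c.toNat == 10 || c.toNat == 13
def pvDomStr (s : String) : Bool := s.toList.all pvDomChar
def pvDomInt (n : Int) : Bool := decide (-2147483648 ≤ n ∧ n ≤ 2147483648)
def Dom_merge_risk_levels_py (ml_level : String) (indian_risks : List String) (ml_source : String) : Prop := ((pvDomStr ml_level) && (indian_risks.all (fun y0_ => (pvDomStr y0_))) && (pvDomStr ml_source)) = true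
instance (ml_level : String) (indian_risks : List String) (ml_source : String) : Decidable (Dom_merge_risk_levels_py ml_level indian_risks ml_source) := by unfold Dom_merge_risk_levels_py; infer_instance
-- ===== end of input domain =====

-- B restructures A's two any() scans into one summarize pass plus a merge step (objective: alternative decomposition).

-- ===== PORT A =====
def merge_risk_levels_py (ml_level : String) (indian_risks : List String) (ml_source : String) : String :=
  if indian_risks.any (fun note => PySem.Str.isIn "high risk" (PySem.Str.lower note)) then "high"
  else if indian_risks.any (fun note => PySem.Str.isIn "medium risk" (PySem.Str.lower note)) then
    (if ml_level == "low" then "medium" else ml_level)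
  else if ml_level == "medium" then "low"
  else ml_level

-- ===== PORT B =====
-- pass 1 of Source B: fold the notes into one categorical summary, breaking on "high risk"
def altIndianLevel (notes : List String) (level : String) : String :=
  match notes with
  | [] => level
  | note :: rest =>
      let text := PySem.Str.lower note
      if PySem.Str.isIn "high risk" text then "high"
      else if PySem.Str.isIn "medium risk" text then altIndianLevel rest "medium"
      else altIndianLevel rest level

def merge_risk_levels_py_alt (ml_level : String) (indian_risks : List String) (ml_source : String) : String :=
  let indian_level := altIndianLevel indian_risks "none"
  if indian_level == "high" then "high"
  else if indian_level == "medium" then (if ml_level == "low" then "medium" else ml_level)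
  else if ml_level == "medium" then "low"
  else ml_level

-- ===== PRECONDITION & SPEC =====
def Spec_merge_risk_levels_py (ml_level : String) (indian_risks : List String) (ml_source : String) (out : String) : Prop := out = merge_risk_levels_py_alt ml_level indian_risks ml_source
instance (ml_level : String) (indian_risks : List String) (ml_source : String) (out : String) : Decidable (Spec_merge_risk_levels_py ml_level indian_risks ml_source out) := by unfold Spec_merge_risk_levels_py; infer_instance

-- ===== CLAIM (what is proved, stated in full; the proofs are below) =====
def Claim_equal_merge_risk_levels_py : Prop := ∀ (ml_level : String) (indian_risks : List String) (ml_source : String), Dom_merge_risk_levels_py ml_level indian_risks ml_source → Spec_merge_risk_levels_py ml_level indian_risks ml_source (merge_risk_levels_py ml_level indian_risks ml_source)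

-- ===== LEMMAS AND PROOFS =====
theorem altIndianLevel_eq (notes : List String) (lvl : String) :
    altIndianLevel notes lvl =
      if notes.any (fun n => PySem.Str.isIn "high risk" (PySem.Str.lower n)) then "high"
      else if notes.any (fun n => PySem.Str.isIn "medium risk" (PySem.Str.lower n)) then "medium"
      else lvl := by
  induction notes generalizing lvl with
  | nil => simp [altIndianLevel]
  | cons note rest ih =>
      simp only [altIndianLevel, List.any_cons, Bool.or_eq_true, ih]
      by_cases h1 : PySem.Str.isIn "high risk" (PySem.Str.lower note) = true <;>
        by_cases h2 : PySem.Str.isIn "medium risk" (PySem.Str.lower note) = true <;>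
          simp only [h1, h2, Bool.false_eq_true, if_true, if_false, true_or, false_or] <;>
            split_ifs <;> rfl

-- ===== VERDICT (by name: the statement is the Claim_ definition above) =====
theorem merge_risk_levels_py_spec : Claim_equal_merge_risk_levels_py := by
  intro ml_level indian_risks ml_source _
  unfold Spec_merge_risk_levels_py merge_risk_levels_py merge_risk_levels_py_alt
  rw [altIndianLevel_eq]
  cases h1 : indian_risks.any (fun n => PySem.Str.isIn "high risk" (PySem.Str.lower n)) <;>
    cases h2 : indian_risks.any (fun n => PySem.Str.isIn "medium risk" (PySem.Str.lower n)) <;>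
      simp only [h1, h2, Bool.false_eq_true, if_false, if_true] <;> simp
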